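-- pv_equiv track=rewrite | github.com/kellypclarke-maker/chimera_v4 | agents/kalshi-meta/orchestrator/run_live_daemon.py | _polymarket_symbol_for_kalshi_ticker
-- ===== SOURCE A (Python) =====
-- from typing import Any, Dict, List, Optional, Sequence, Tuple
--
-- POLYMARKET_SYMBOL_BY_EVENT_PREFIX: Dict[str, str] = {
--     "KXBTC15M": "btcusdt",
--     "KXBTCD": "btcusdt",
--     "KXBTC": "btcusdt",
--     "KXETH15M": "ethusdt",
--     "KXETHD": "ethusdt",
--     "KXETH": "ethusdt",
--     "KXXRPD": "xrpusdt",
--     "KXXRP": "xrpusdt",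
--     "KXSOLE": "solusdt",
--     "KXSOLD": "solusdt",
--     "KXSOL": "solusdt",
-- }
--
-- def _polymarket_symbol_for_kalshi_ticker(ticker: str) -> Optional[str]:
--     tok = str(ticker or "").strip().upper()
--     if not tok:
--         return None
--     for prefix in sorted(POLYMARKET_SYMBOL_BY_EVENT_PREFIX.keys(), key=len, reverse=True):
--         if tok.startswith(prefix):
--             return str(POLYMARKET_SYMBOL_BY_EVENT_PREFIX[prefix])
--     return None
-- ===== SOURCE B (Python) =====
-- _COIN = {"BTC": "btcusdt", "ETH": "ethusdt", "XRP": "xrpusdt", "SOL": "solusdt"}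
--
-- def _polymarket_symbol_for_kalshi_ticker(ticker):
--     tok = str(ticker or "").strip().upper()
--     if not tok or tok[:2] != "KX":
--         return None
--     return _COIN.get(tok[2:5])
-- ===== Notes on version B (the rewrite author's own statement) =====
-- stated objective: simpler
-- what changed: Replaced the sorted longest-prefix-first scan over an 11-entry table by a two-character exchange-prefix guard plus a single dict lookup on the 3-letter coin code, exact because every table prefix extends the guard plus a coin code and all variants of a coin map to the same symbol.
import Mathlib
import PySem

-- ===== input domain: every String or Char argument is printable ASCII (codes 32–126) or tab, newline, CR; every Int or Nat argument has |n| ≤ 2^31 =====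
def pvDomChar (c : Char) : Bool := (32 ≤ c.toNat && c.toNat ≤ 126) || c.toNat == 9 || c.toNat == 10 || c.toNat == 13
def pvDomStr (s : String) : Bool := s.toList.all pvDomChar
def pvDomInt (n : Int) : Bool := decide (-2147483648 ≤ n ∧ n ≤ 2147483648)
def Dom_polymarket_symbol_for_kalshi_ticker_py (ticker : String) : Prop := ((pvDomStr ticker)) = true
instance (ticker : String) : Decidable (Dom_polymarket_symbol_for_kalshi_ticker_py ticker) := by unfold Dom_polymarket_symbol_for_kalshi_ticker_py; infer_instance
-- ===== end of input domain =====

-- B replaces A's sorted longest-prefix-first scan by a 'KX' guard plus one lookup of the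
-- 3-letter coin code tok[2:5]; exact because all table prefixes are 'KX'+coin(+suffix) and
-- every variant of a coin maps to the same symbol. Return-value equivalence; no mutation.

-- ===== PORT A =====
-- POLYMARKET_SYMBOL_BY_EVENT_PREFIX, keys as code-point lists (str ↦ List Char)
def pvMap : PySem.Dict (List Char) String :=
  ⟨[("KXBTC15M".toList, "btcusdt"), ("KXBTCD".toList, "btcusdt"), ("KXBTC".toList, "btcusdt"),
    ("KXETH15M".toList, "ethusdt"), ("KXETHD".toList, "ethusdt"), ("KXETH".toList, "ethusdt"),
    ("KXXRPD".toList, "xrpusdt"), ("KXXRP".toList, "xrpusdt"),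
    ("KXSOLE".toList, "solusdt"), ("KXSOLD".toList, "solusdt"), ("KXSOL".toList, "solusdt")]⟩

-- the for-loop over the sorted prefixes: first matching prefix wins
def pvLoopA (tok : List Char) : List (List Char) → Option String
  | [] => none
  | p :: rest =>
      if PySem.Chars.startswith tok p then PySem.Dict.get? pvMap p else pvLoopA tok rest

def polymarket_symbol_for_kalshi_ticker_py (ticker : String) : Option String :=
  let tok := PySem.Chars.upper (PySem.Chars.strip ticker.toList)
  if tok = [] then none
  else pvLoopA tok (PySem.List.sorted (PySem.Dict.keys pvMap) (fun p => p.length) true)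

-- ===== PORT B =====
def pvCoin : PySem.Dict (List Char) String :=
  ⟨[("BTC".toList, "btcusdt"), ("ETH".toList, "ethusdt"),
    ("XRP".toList, "xrpusdt"), ("SOL".toList, "solusdt")]⟩

def polymarket_symbol_for_kalshi_ticker_py_alt (ticker : String) : Option String :=
  let tok := PySem.Chars.upper (PySem.Chars.strip ticker.toList)
  if tok = [] ∨ PySem.List.slice tok none (some 2) ≠ "KX".toList then none
  else PySem.Dict.get? pvCoin (PySem.List.slice tok (some 2) (some 5))

-- ===== PRECONDITION & SPEC =====
def Spec_polymarket_symbol_for_kalshi_ticker_py (ticker : String) (out : Option String) : Prop := out = polymarket_symbol_for_kalshi_ticker_py_alt ticker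
instance (ticker : String) (out : Option String) : Decidable (Spec_polymarket_symbol_for_kalshi_ticker_py ticker out) := by unfold Spec_polymarket_symbol_for_kalshi_ticker_py; infer_instance

-- ===== CLAIM (what is proved, stated in full; the proofs are below) =====
def Claim_equal_polymarket_symbol_for_kalshi_ticker_py : Prop := ∀ (ticker : String), Dom_polymarket_symbol_for_kalshi_ticker_py ticker → Spec_polymarket_symbol_for_kalshi_ticker_py ticker (polymarket_symbol_for_kalshi_ticker_py ticker)

-- ===== LEMMAS AND PROOFS =====
theorem pvSorted_eval :
    PySem.List.sorted (PySem.Dict.keys pvMap) (fun p => p.length) true =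
      ["KXBTC15M".toList, "KXETH15M".toList, "KXBTCD".toList, "KXETHD".toList,
       "KXXRPD".toList, "KXSOLE".toList, "KXSOLD".toList,
       "KXBTC".toList, "KXETH".toList, "KXXRP".toList, "KXSOL".toList] := by decide

theorem pvCore (cs : List Char) :
    pvLoopA cs (PySem.List.sorted (PySem.Dict.keys pvMap) (fun p => p.length) true) =
      (if cs = [] ∨ PySem.List.slice cs none (some 2) ≠ "KX".toList then none
       else PySem.Dict.get? pvCoin (PySem.List.slice cs (some 2) (some 5))) := by
  rw [pvSorted_eval]
  match cs with
  | [] => decide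
  | [a] =>
      simp [pvLoopA, PySem.Chars.startswith, PySem.List.slice, PySem.List.clampIdx, PySem.Dict.get?, pvCoin, pvMap, PySem.Dict.items]
  | [a, b] =>
      by_cases ha : a = 'K' <;> by_cases hb : b = 'X' <;>
        simp [pvLoopA, PySem.Chars.startswith, PySem.List.slice, PySem.List.clampIdx, PySem.Dict.get?, pvCoin, pvMap, PySem.Dict.items, ha, hb]
  | [a, b, c] =>
      by_cases ha : a = 'K' <;> by_cases hb : b = 'X' <;>
        simp [pvLoopA, PySem.Chars.startswith, PySem.List.slice, PySem.List.clampIdx, PySem.Dict.get?, pvCoin, pvMap, PySem.Dict.items, ha, hb]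
  | [a, b, c, d] =>
      by_cases ha : a = 'K' <;> by_cases hb : b = 'X' <;>
        simp [pvLoopA, PySem.Chars.startswith, PySem.List.slice, PySem.List.clampIdx, PySem.Dict.get?, pvCoin, pvMap, PySem.Dict.items, ha, hb]
  | a :: b :: c :: d :: e :: rest =>
      by_cases ha : a = 'K'
      · by_cases hb : b = 'X'
        · subst ha hb
          by_cases hB : c = 'B'
          · subst hB
            by_cases hd : d = 'T'
            · subst hd
              by_cases he : e = 'C'
              · subst he; simp [pvLoopA, PySem.Chars.startswith, PySem.List.slice, PySem.List.clampIdx, PySem.Dict.get?, pvCoin, pvMap, PySem.Dict.items]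
              · simp [pvLoopA, PySem.Chars.startswith, PySem.List.slice, PySem.List.clampIdx, PySem.Dict.get?, pvCoin, pvMap, PySem.Dict.items, he, Ne.symm he]
            · by_cases he : e = 'C'
              · subst he; simp [pvLoopA, PySem.Chars.startswith, PySem.List.slice, PySem.List.clampIdx, PySem.Dict.get?, pvCoin, pvMap, PySem.Dict.items, hd, Ne.symm hd]
              · simp [pvLoopA, PySem.Chars.startswith, PySem.List.slice, PySem.List.clampIdx, PySem.Dict.get?, pvCoin, pvMap, PySem.Dict.items, hd, Ne.symm hd, he, Ne.symm he]
          · by_cases hE : c = 'E'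
            · subst hE
              by_cases hd : d = 'T'
              · subst hd
                by_cases he : e = 'H'
                · subst he; simp [pvLoopA, PySem.Chars.startswith, PySem.List.slice, PySem.List.clampIdx, PySem.Dict.get?, pvCoin, pvMap, PySem.Dict.items]
                · simp [pvLoopA, PySem.Chars.startswith, PySem.List.slice, PySem.List.clampIdx, PySem.Dict.get?, pvCoin, pvMap, PySem.Dict.items, he, Ne.symm he]
              · by_cases he : e = 'H'
                · subst he; simp [pvLoopA, PySem.Chars.startswith, PySem.List.slice, PySem.List.clampIdx, PySem.Dict.get?, pvCoin, pvMap, PySem.Dict.items, hd, Ne.symm hd]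
                · simp [pvLoopA, PySem.Chars.startswith, PySem.List.slice, PySem.List.clampIdx, PySem.Dict.get?, pvCoin, pvMap, PySem.Dict.items, hd, Ne.symm hd, he, Ne.symm he]
            · by_cases hX : c = 'X'
              · subst hX
                by_cases hd : d = 'R'
                · subst hd
                  by_cases he : e = 'P'
                  · subst he; simp [pvLoopA, PySem.Chars.startswith, PySem.List.slice, PySem.List.clampIdx, PySem.Dict.get?, pvCoin, pvMap, PySem.Dict.items]
                  · simp [pvLoopA, PySem.Chars.startswith, PySem.List.slice, PySem.List.clampIdx, PySem.Dict.get?, pvCoin, pvMap, PySem.Dict.items, he, Ne.symm he]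
                · by_cases he : e = 'P'
                  · subst he; simp [pvLoopA, PySem.Chars.startswith, PySem.List.slice, PySem.List.clampIdx, PySem.Dict.get?, pvCoin, pvMap, PySem.Dict.items, hd, Ne.symm hd]
                  · simp [pvLoopA, PySem.Chars.startswith, PySem.List.slice, PySem.List.clampIdx, PySem.Dict.get?, pvCoin, pvMap, PySem.Dict.items, hd, Ne.symm hd, he, Ne.symm he]
              · by_cases hS : c = 'S'
                · subst hS
                  by_cases hd : d = 'O'
                  · subst hd
                    by_cases he : e = 'L'
                    · subst he; simp [pvLoopA, PySem.Chars.startswith, PySem.List.slice, PySem.List.clampIdx, PySem.Dict.get?, pvCoin, pvMap, PySem.Dict.items]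
                    · simp [pvLoopA, PySem.Chars.startswith, PySem.List.slice, PySem.List.clampIdx, PySem.Dict.get?, pvCoin, pvMap, PySem.Dict.items, he, Ne.symm he]
                  · by_cases he : e = 'L'
                    · subst he; simp [pvLoopA, PySem.Chars.startswith, PySem.List.slice, PySem.List.clampIdx, PySem.Dict.get?, pvCoin, pvMap, PySem.Dict.items, hd, Ne.symm hd]
                    · simp [pvLoopA, PySem.Chars.startswith, PySem.List.slice, PySem.List.clampIdx, PySem.Dict.get?, pvCoin, pvMap, PySem.Dict.items, hd, Ne.symm hd, he, Ne.symm he]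
                · simp [pvLoopA, PySem.Chars.startswith, PySem.List.slice, PySem.List.clampIdx, PySem.Dict.get?, pvCoin, pvMap, PySem.Dict.items, hB, Ne.symm hB, hE, Ne.symm hE, hX, Ne.symm hX, hS, Ne.symm hS]
        · simp [pvLoopA, PySem.Chars.startswith, PySem.List.slice, PySem.List.clampIdx, PySem.Dict.get?, pvCoin, pvMap, PySem.Dict.items, hb, Ne.symm hb]
      · simp [pvLoopA, PySem.Chars.startswith, PySem.List.slice, PySem.List.clampIdx, PySem.Dict.get?, pvCoin, pvMap, PySem.Dict.items, ha, Ne.symm ha]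

-- ===== VERDICT (by name: the statement is the Claim_ definition above) =====
theorem polymarket_symbol_for_kalshi_ticker_py_spec : Claim_equal_polymarket_symbol_for_kalshi_ticker_py := by
  intro ticker _
  unfold Spec_polymarket_symbol_for_kalshi_ticker_py
  unfold polymarket_symbol_for_kalshi_ticker_py polymarket_symbol_for_kalshi_ticker_py_alt
  have h := pvCore (PySem.Chars.upper (PySem.Chars.strip ticker.toList))
  by_cases he : PySem.Chars.upper (PySem.Chars.strip ticker.toList) = [] <;>
    simp [he] at h ⊢ <;> simp [h]
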